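-- pv_equiv track=rewrite | github.com/a-pesquera/adventofcode2022 | days/day23.py | count_ground_tiles
-- ===== SOURCE A (Python) =====
-- def count_ground_tiles(elves):
--     min_x = min(p[0] for p in elves)
--     max_x = max(p[0] for p in elves)
--     min_y = min(p[1] for p in elves)
--     max_y = max(p[1] for p in elves)
--     ground = 0
--     for i in range(min_x, max_x + 1):
--         for j in range(min_y, max_y + 1):
--             point = (i, j)
--             if point not in elves:
--                 ground += 1
--     return ground
-- ===== SOURCE B (Python) =====
-- def count_ground_tiles(elves):
--     xs = [p[0] for p in elves]
--     ys = [p[1] for p in elves]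
--     width = max(xs) - min(xs) + 1
--     height = max(ys) - min(ys) + 1
--     return width * height - len(set(elves))
-- ===== Notes on version B (the rewrite author's own statement) =====
-- stated objective: faster
-- what changed: Replaces the scan of every cell of the bounding box with a membership test per cell by the closed-form area of the box minus the number of distinct elf positions.
import Mathlib
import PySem

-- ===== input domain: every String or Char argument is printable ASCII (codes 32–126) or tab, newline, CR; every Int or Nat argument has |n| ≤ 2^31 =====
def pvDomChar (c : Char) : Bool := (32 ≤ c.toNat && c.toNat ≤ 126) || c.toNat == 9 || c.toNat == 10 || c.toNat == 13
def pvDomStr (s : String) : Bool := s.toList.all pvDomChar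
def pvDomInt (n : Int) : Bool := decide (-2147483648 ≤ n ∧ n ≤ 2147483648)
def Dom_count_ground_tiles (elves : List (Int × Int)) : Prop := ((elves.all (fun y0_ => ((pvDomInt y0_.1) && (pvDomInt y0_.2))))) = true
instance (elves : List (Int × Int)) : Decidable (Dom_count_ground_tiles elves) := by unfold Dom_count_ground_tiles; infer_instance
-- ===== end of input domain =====

-- B replaces A's cell-by-cell scan of the bounding box with the closed-form
-- box area minus the number of distinct elf positions (objective: faster).

-- ===== PORT A =====
-- literal port: min/max of the coordinate generators, then a nested loop over
-- the bounding box counting points not in `elves`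
def count_ground_tiles (elves : List (Int × Int)) : Int :=
  let min_x := (PySem.List.min? (elves.map (fun p => p.1)) (fun x => x)).getD 0
  let max_x := (PySem.List.max? (elves.map (fun p => p.1)) (fun x => x)).getD 0
  let min_y := (PySem.List.min? (elves.map (fun p => p.2)) (fun x => x)).getD 0
  let max_y := (PySem.List.max? (elves.map (fun p => p.2)) (fun x => x)).getD 0
  (PySem.List.pyRange min_x (max_x + 1) 1).foldl (fun ground i =>
    (PySem.List.pyRange min_y (max_y + 1) 1).foldl (fun ground j =>
      if (i, j) ∉ elves then ground + 1 else ground) ground) 0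

-- ===== PORT B =====
def count_ground_tiles_alt (elves : List (Int × Int)) : Int :=
  let xs := elves.map (fun p => p.1)
  let ys := elves.map (fun p => p.2)
  let width := (PySem.List.max? xs (fun x => x)).getD 0 - (PySem.List.min? xs (fun x => x)).getD 0 + 1
  let height := (PySem.List.max? ys (fun x => x)).getD 0 - (PySem.List.min? ys (fun x => x)).getD 0 + 1
  width * height - PySem.Set.len (PySem.Set.ofList elves)

-- ===== PRECONDITION & SPEC =====
-- Python A raises ValueError (min of an empty generator) on the empty list; B raises too.
def Pre_count_ground_tiles (elves : List (Int × Int)) : Prop := elves ≠ []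
instance (elves : List (Int × Int)) : Decidable (Pre_count_ground_tiles elves) := by unfold Pre_count_ground_tiles; infer_instance
def pvWitness_count_ground_tiles : (List (Int × Int)) := [(0, 0), (2, 3)]

def Spec_count_ground_tiles (elves : List (Int × Int)) (out : Int) : Prop := out = count_ground_tiles_alt elves
instance (elves : List (Int × Int)) (out : Int) : Decidable (Spec_count_ground_tiles elves out) := by unfold Spec_count_ground_tiles; infer_instance

-- ===== CLAIM (what is proved, stated in full; the proofs are below) =====
def Claim_equal_count_ground_tiles : Prop := ∀ (elves : List (Int × Int)), Dom_count_ground_tiles elves → Pre_count_ground_tiles elves → Spec_count_ground_tiles elves (count_ground_tiles elves)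

-- ===== LEMMAS AND PROOFS =====

-- the grid of all points of the bounding box, row-major as A visits them
def pvGrid (mnx mxx mny mxy : Int) : List (Int × Int) :=
  (PySem.List.pyRange mnx (mxx + 1) 1).flatMap (fun i =>
    (PySem.List.pyRange mny (mxy + 1) 1).map (fun j => (i, j)))

lemma pvGrid_nodup (mnx mxx mny mxy : Int) : (pvGrid mnx mxx mny mxy).Nodup := by
  unfold pvGrid
  rw [List.nodup_flatMap]
  constructor
  · intro i _
    exact (PySem.List.nodup_pyRange_one mny (mxy + 1)).map (fun a b h => by
      simpa using congrArg Prod.snd h)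
  · have := PySem.List.nodup_pyRange_one mnx (mxx + 1)
    refine this.imp ?_
    intro i i' hne p hp hp'
    simp only [List.mem_map] at hp hp'
    obtain ⟨j, _, rfl⟩ := hp
    obtain ⟨j', _, h⟩ := hp'
    exact hne (by simpa using congrArg Prod.fst h.symm)

lemma pvGrid_length (mnx mxx mny mxy : Int) :
    (pvGrid mnx mxx mny mxy).length = (mxx + 1 - mnx).toNat * (mxy + 1 - mny).toNat := by
  unfold pvGrid
  rw [List.length_flatMap]
  simp only [List.length_map, PySem.List.length_pyRange_one]
  rw [List.map_const', List.sum_replicate, smul_eq_mul, PySem.List.length_pyRange_one]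

lemma pvMem_grid {elves : List (Int × Int)} {mnx mxx mny mxy : Int}
    (hmn : ∀ p ∈ elves, mnx ≤ p.1) (hmx : ∀ p ∈ elves, p.1 ≤ mxx)
    (hny : ∀ p ∈ elves, mny ≤ p.2) (hxy : ∀ p ∈ elves, p.2 ≤ mxy)
    {p : Int × Int} (hp : p ∈ elves) : p ∈ pvGrid mnx mxx mny mxy := by
  unfold pvGrid
  rw [List.mem_flatMap]
  refine ⟨p.1, ?_, ?_⟩
  · rw [PySem.List.mem_pyRange_one]
    exact ⟨hmn p hp, by have := hmx p hp; omega⟩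
  · rw [List.mem_map]
    refine ⟨p.2, ?_, rfl⟩
    rw [PySem.List.mem_pyRange_one]
    exact ⟨hny p hp, by have := hxy p hp; omega⟩

-- distinct points of `elves` = elves.toFinset.card, counted inside any nodup superlist
lemma pvCount_mem {grid elves : List (Int × Int)} (hnd : grid.Nodup)
    (hsub : ∀ p ∈ elves, p ∈ grid) :
    grid.countP (fun p => decide (p ∈ elves)) = elves.toFinset.card := by
  rw [List.countP_eq_length_filter]
  rw [← List.toFinset_card_of_nodup (hnd.filter _)]
  congr 1
  ext x
  simp only [List.mem_toFinset, List.mem_filter, decide_eq_true_eq]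
  exact ⟨fun h => h.2, fun h => ⟨hsub x h, h⟩⟩

lemma pvSet_len (elves : List (Int × Int)) :
    PySem.Set.len (PySem.Set.ofList elves) = (elves.toFinset.card : Int) := by
  have hnd := PySem.Set.nodup_ofList elves
  have : (PySem.Set.ofList elves).toFinset = elves.toFinset := by
    ext x; simp [PySem.Set.mem_ofList]
  rw [PySem.Set.len]
  rw [← List.toFinset_card_of_nodup hnd, this]

lemma pvCountP_not_eq (l : List (Int × Int)) (p : (Int × Int) → Prop) [DecidablePred p] :
    l.countP (fun a => decide (¬ p a)) = l.length - l.countP (fun a => decide (p a)) := by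
  induction l with
  | nil => simp
  | cons x t ih =>
    have hle : t.countP (fun a => decide (p a)) ≤ t.length := List.countP_le_length
    rw [List.countP_cons, List.countP_cons, List.length_cons, ih]
    by_cases h : p x <;> simp [h] <;> omega

-- A's nested loop counts the grid points not in `elves`
lemma pvLoop_eq_countP (elves : List (Int × Int)) (mnx mxx mny mxy : Int) :
    (PySem.List.pyRange mnx (mxx + 1) 1).foldl (fun ground i =>
      (PySem.List.pyRange mny (mxy + 1) 1).foldl (fun ground j =>
        if (i, j) ∉ elves then ground + 1 else ground) ground) 0
    = ((pvGrid mnx mxx mny mxy).countP (fun p => decide (p ∉ elves)) : Int) := by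
  have hin : ∀ (i : Int) (g : Int),
      (PySem.List.pyRange mny (mxy + 1) 1).foldl (fun ground j =>
        if (i, j) ∉ elves then ground + 1 else ground) g
      = g + ((PySem.List.pyRange mny (mxy + 1) 1).countP (fun j => decide ((i, j) ∉ elves)) : Int) := by
    intro i g
    have := PySem.List.foldl_count_if (fun j => decide ((i, j) ∉ elves))
      (PySem.List.pyRange mny (mxy + 1) 1) g
    simpa using this
  have houter :
      (fun (ground : Int) (i : Int) =>
        (PySem.List.pyRange mny (mxy + 1) 1).foldl (fun ground j =>
          if (i, j) ∉ elves then ground + 1 else ground) ground)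
      = fun ground i => ground +
          ((PySem.List.pyRange mny (mxy + 1) 1).countP (fun j => decide ((i, j) ∉ elves)) : Int) := by
    funext g i; exact hin i g
  rw [houter, PySem.List.foldl_add]
  unfold pvGrid
  rw [List.countP_flatMap]
  rw [zero_add]
  rw [Nat.cast_list_sum]
  rw [List.map_map]
  congr 1
  apply List.map_congr_left
  intro i _
  simp [Function.comp_def]

-- the key counting identity, for any valid coordinate bounds
lemma pvMaster (elves : List (Int × Int)) (mnx mxx mny mxy : Int) (hne : elves ≠ [])
    (hmn : ∀ p ∈ elves, mnx ≤ p.1) (hmx : ∀ p ∈ elves, p.1 ≤ mxx)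
    (hny : ∀ p ∈ elves, mny ≤ p.2) (hxy : ∀ p ∈ elves, p.2 ≤ mxy) :
    (PySem.List.pyRange mnx (mxx + 1) 1).foldl (fun ground i =>
      (PySem.List.pyRange mny (mxy + 1) 1).foldl (fun ground j =>
        if (i, j) ∉ elves then ground + 1 else ground) ground) 0
    = (mxx - mnx + 1) * (mxy - mny + 1) - (elves.toFinset.card : Int) := by
  obtain ⟨e, he⟩ := List.exists_mem_of_ne_nil elves hne
  have hx : mnx ≤ mxx := le_trans (hmn e he) (hmx e he)
  have hy : mny ≤ mxy := le_trans (hny e he) (hxy e he)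
  rw [pvLoop_eq_countP]
  set grid := pvGrid mnx mxx mny mxy with hg
  have hsplit : grid.countP (fun p => decide (p ∉ elves))
      = grid.length - grid.countP (fun p => decide (p ∈ elves)) :=
    pvCountP_not_eq grid (fun p => p ∈ elves)
  have hcard := pvCount_mem (pvGrid_nodup mnx mxx mny mxy) (fun p hp => pvMem_grid hmn hmx hny hxy hp)
  have hle : grid.countP (fun p => decide (p ∈ elves)) ≤ grid.length := List.countP_le_length
  have hlen := pvGrid_length mnx mxx mny mxy
  rw [hsplit, hcard]
  have hle' : elves.toFinset.card ≤ grid.length := hcard ▸ hle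
  rw [Nat.cast_sub hle', hlen, Nat.cast_mul,
    Int.toNat_of_nonneg (by omega : (0:Int) ≤ mxx + 1 - mnx),
    Int.toNat_of_nonneg (by omega : (0:Int) ≤ mxy + 1 - mny)]
  ring

-- ===== VERDICT (by name: the statement is the Claim_ definition above) =====
theorem count_ground_tiles_spec : Claim_equal_count_ground_tiles := by
  intro elves _ hpre
  unfold Pre_count_ground_tiles at hpre
  unfold Spec_count_ground_tiles count_ground_tiles count_ground_tiles_alt
  have hxs : elves.map (fun p => p.1) ≠ [] := by simpa using hpre
  have hys : elves.map (fun p => p.2) ≠ [] := by simpa using hpre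
  obtain ⟨mnx, hmnx⟩ := Option.ne_none_iff_exists'.mp
    (fun h => hxs ((PySem.List.min?_eq_none_iff (elves.map (fun p => p.1)) (fun x : Int => x)).mp h))
  obtain ⟨mxx, hmxx⟩ := Option.ne_none_iff_exists'.mp
    (fun h => hxs ((PySem.List.max?_eq_none_iff (elves.map (fun p => p.1)) (fun x : Int => x)).mp h))
  obtain ⟨mny, hmny⟩ := Option.ne_none_iff_exists'.mp
    (fun h => hys ((PySem.List.min?_eq_none_iff (elves.map (fun p => p.2)) (fun x : Int => x)).mp h))
  obtain ⟨mxy, hmxy⟩ := Option.ne_none_iff_exists'.mp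
    (fun h => hys ((PySem.List.max?_eq_none_iff (elves.map (fun p => p.2)) (fun x : Int => x)).mp h))
  simp only [hmnx, hmxx, hmny, hmxy, Option.getD_some]
  have hmn : ∀ p ∈ elves, mnx ≤ p.1 := fun p hp =>
    PySem.List.min?_isMin hmnx p.1 (List.mem_map.mpr ⟨p, hp, rfl⟩)
  have hmx : ∀ p ∈ elves, p.1 ≤ mxx := fun p hp =>
    PySem.List.max?_isMax hmxx p.1 (List.mem_map.mpr ⟨p, hp, rfl⟩)
  have hny : ∀ p ∈ elves, mny ≤ p.2 := fun p hp =>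
    PySem.List.min?_isMin hmny p.2 (List.mem_map.mpr ⟨p, hp, rfl⟩)
  have hxy : ∀ p ∈ elves, p.2 ≤ mxy := fun p hp =>
    PySem.List.max?_isMax hmxy p.2 (List.mem_map.mpr ⟨p, hp, rfl⟩)
  rw [pvMaster elves mnx mxx mny mxy hpre hmn hmx hny hxy, pvSet_len]
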